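-- pv_equiv track=rewrite | github.com/HayrapetyanSergey/10_days_in_academy | exr_4_4.py | even_sorted
-- ===== SOURCE A (Python) =====
-- def even_sorted(lst):
--     new_lst = []
--     for i in range(len(lst)):
--         if lst[i] % 2 == 0:
--             new_lst.append(lst[i])
--     for i in range(len(lst)):
--         if lst[i] not in new_lst:
--             new_lst.append(lst[i])
--     return new_lst
-- ===== SOURCE B (Python) =====
-- def even_sorted(lst):
--     evens = []
--     odds = []
--     seen = set()
--     for x in lst:
--         if x % 2 == 0:
--             evens.append(x)
--         else:
--             if x not in seen:
--                 seen.add(x)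
--                 odds.append(x)
--     return evens + odds
-- ===== Notes on version B (the rewrite author's own statement) =====
-- stated objective: simpler
-- what changed: Replaced A's two index-loops (the second scanning the growing output list for membership, O(n^2)) with one classifying pass that keeps separate evens/odds lists and a seen-set for odd dedup, then concatenates.
import Mathlib
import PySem

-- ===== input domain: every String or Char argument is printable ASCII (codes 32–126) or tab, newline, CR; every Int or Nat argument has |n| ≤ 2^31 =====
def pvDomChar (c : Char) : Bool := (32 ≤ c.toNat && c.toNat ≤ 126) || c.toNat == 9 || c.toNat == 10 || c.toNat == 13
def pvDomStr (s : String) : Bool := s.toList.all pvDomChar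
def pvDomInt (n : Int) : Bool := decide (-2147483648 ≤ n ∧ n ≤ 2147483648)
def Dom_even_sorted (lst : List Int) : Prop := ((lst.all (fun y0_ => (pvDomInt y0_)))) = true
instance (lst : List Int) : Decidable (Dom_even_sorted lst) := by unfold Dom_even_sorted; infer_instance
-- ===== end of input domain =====

-- B replaces A's two index-loops (the second rescanning the growing output list on every
-- element) by one classifying pass with separate evens/odds lists and a seen-set for odd dedup.

-- ===== PORT A =====
-- two index loops over range(len(lst)); lst[i] is always in range, so pyGetD is exact here
def even_sorted (lst : List Int) : List Int :=
  let new1 :=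
    (PySem.List.pyRange 0 (PySem.List.len lst) 1).foldl
      (fun acc i =>
        if PySem.Int.mod (PySem.List.pyGetD lst i 0) 2 == 0 then acc ++ [PySem.List.pyGetD lst i 0]
        else acc) []
  (PySem.List.pyRange 0 (PySem.List.len lst) 1).foldl
    (fun acc i =>
      if !(acc.contains (PySem.List.pyGetD lst i 0)) then acc ++ [PySem.List.pyGetD lst i 0]
      else acc) new1

-- ===== PORT B =====
-- single pass over the elements with state (evens, odds, seen)
def even_sorted_alt_go (evens odds : List Int) (seen : PySem.Set Int) : List Int → List Int
  | [] => evens ++ odds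
  | x :: xs =>
    if PySem.Int.mod x 2 == 0 then even_sorted_alt_go (evens ++ [x]) odds seen xs
    else if PySem.Set.contains seen x then even_sorted_alt_go evens odds seen xs
    else even_sorted_alt_go evens (odds ++ [x]) (PySem.Set.add seen x) xs

def even_sorted_alt (lst : List Int) : List Int :=
  even_sorted_alt_go [] [] PySem.Set.empty lst

-- ===== PRECONDITION & SPEC =====
def Spec_even_sorted (lst : List Int) (out : List Int) : Prop := out = even_sorted_alt lst
instance (lst : List Int) (out : List Int) : Decidable (Spec_even_sorted lst out) := by unfold Spec_even_sorted; infer_instance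

-- ===== CLAIM (what is proved, stated in full; the proofs are below) =====
def Claim_equal_even_sorted : Prop := ∀ (lst : List Int), Dom_even_sorted lst → Spec_even_sorted lst (even_sorted lst)

-- ===== LEMMAS AND PROOFS =====

-- canonical second phase: collect first occurrences of the odd elements of lst after odds
def pvCanon (odds : List Int) : List Int → List Int
  | [] => odds
  | x :: xs =>
    if PySem.Int.mod x 2 == 0 then pvCanon odds xs
    else if odds.contains x then pvCanon odds xs
    else pvCanon (odds ++ [x]) xs

theorem pv_go_eq (lst : List Int) : ∀ (evens odds : List Int),
    even_sorted_alt_go evens odds odds lst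
      = (evens ++ lst.filter (fun x => PySem.Int.mod x 2 == 0)) ++ pvCanon odds lst := by
  induction lst with
  | nil => intro evens odds; simp [even_sorted_alt_go, pvCanon]
  | cons x xs ih =>
    intro evens odds
    cases hx : (PySem.Int.mod x 2 == 0) with
    | true =>
      simp only [even_sorted_alt_go, pvCanon, List.filter_cons, hx, if_true]
      rw [ih (evens ++ [x]) odds]
      simp
    | false =>
      cases hc : PySem.Set.contains odds x with
      | true =>
        have hc' : odds.contains x = true := by simpa using hc
        simp only [even_sorted_alt_go, pvCanon, List.filter_cons, hx, hc, hc',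
          Bool.false_eq_true, if_false, if_true]
        exact ih evens odds
      | false =>
        have hc' : odds.contains x = false := by simpa using hc
        have hnm : x ∉ odds := by
          intro hm
          rw [← List.contains_iff_mem, hc'] at hm
          exact Bool.false_ne_true hm
        have hadd : PySem.Set.add odds x = odds ++ [x] := PySem.Set.add_of_not_mem hnm
        simp only [even_sorted_alt_go, pvCanon, List.filter_cons, hx, hc, hc', hadd,
          Bool.false_eq_true, if_false]
        exact ih evens (odds ++ [x])

theorem pv_dedup_fold_eq (lst : List Int) (E : List Int)
    (hE : ∀ y ∈ E, PySem.Int.mod y 2 == 0)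
    (hcov : ∀ x ∈ lst, PySem.Int.mod x 2 == 0 → E.contains x = true) :
    ∀ (odds : List Int), (∀ y ∈ odds, ¬ (PySem.Int.mod y 2 == 0)) →
    lst.foldl (fun acc x => if !(acc.contains x) then acc ++ [x] else acc) (E ++ odds)
      = E ++ pvCanon odds lst := by
  induction lst with
  | nil => intro odds _; simp [pvCanon]
  | cons x xs ih =>
    intro odds hodds
    have hcov' : ∀ y ∈ xs, PySem.Int.mod y 2 == 0 → E.contains y = true :=
      fun y hy => hcov y (List.mem_cons_of_mem _ hy)
    by_cases hx : PySem.Int.mod x 2 == 0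
    · have hxE : E.contains x = true := hcov x (List.mem_cons_self) hx
      have hmem : (E ++ odds).contains x = true := by
        simp only [List.contains_append, hxE, Bool.true_or]
      simp only [List.foldl_cons, hmem, Bool.not_true, Bool.false_eq_true, if_false,
        pvCanon, hx, if_true]
      exact ih hcov' odds hodds
    · have hxE : E.contains x = false := by
        by_contra h
        have hx2 : x ∈ E := by
          cases hEx : E.contains x with
          | false => exact absurd hEx h
          | true => simpa using hEx
        exact hx (hE x hx2)
      by_cases hc : odds.contains x = true
      · have hmem : (E ++ odds).contains x = true := by
          simp only [List.contains_append, hc, Bool.or_true]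
        simp only [List.foldl_cons, hmem, Bool.not_true, Bool.false_eq_true, if_false,
          pvCanon, hx, if_false, hc, if_true]
        exact ih hcov' odds hodds
      · have hc' : odds.contains x = false := by simpa using hc
        have hmem : (E ++ odds).contains x = false := by
          simp only [List.contains_append, hc', hxE, Bool.or_false]
        have hodds' : ∀ y ∈ odds ++ [x], ¬ (PySem.Int.mod y 2 == 0) := by
          intro y hy
          rcases List.mem_append.mp hy with h | h
          · exact hodds y h
          · simp at h; subst h; exact hx
        have := ih hcov' (odds ++ [x]) hodds'
        simp only [List.foldl_cons, hmem, Bool.not_false, if_true, pvCanon, hx,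
          Bool.false_eq_true, if_false, hc', List.append_assoc] at this ⊢
        exact this

-- ===== VERDICT (by name: the statement is the Claim_ definition above) =====
theorem even_sorted_spec : Claim_equal_even_sorted := by
  intro lst _
  unfold Spec_even_sorted even_sorted even_sorted_alt
  rw [PySem.List.len_eq,
      PySem.List.foldl_pyRange_zero_pyGetD' lst 0
        (fun acc x => if PySem.Int.mod x 2 == 0 then acc ++ [x] else acc) [],
      PySem.List.foldl_pyRange_zero_pyGetD' lst 0
        (fun acc x => if !(acc.contains x) then acc ++ [x] else acc) _,
      PySem.List.foldl_append_if_eq_filter]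
  have hE : ∀ y ∈ lst.filter (fun x => PySem.Int.mod x 2 == 0), PySem.Int.mod y 2 == 0 := by
    intro y hy; exact (List.mem_filter.mp hy).2
  have hcov : ∀ x ∈ lst, PySem.Int.mod x 2 == 0 →
      (lst.filter (fun x => PySem.Int.mod x 2 == 0)).contains x = true := by
    intro x hx hpx
    simp only [List.contains_iff_mem] at *
    exact List.mem_filter.mpr ⟨hx, hpx⟩
  have hA := pv_dedup_fold_eq lst (lst.filter (fun x => PySem.Int.mod x 2 == 0)) hE hcov
      [] (by simp)
  have hB := pv_go_eq lst [] []
  simp only [List.append_nil, List.nil_append] at hA hB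
  simp only [List.nil_append]
  rw [hA]
  exact hB.symm
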